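-- pv_equiv track=rewrite | github.com/andycann44/aim2build-instruction | clean/routers/workflow.py | _last_confirmed_bag_before_page_with_candidates
-- ===== SOURCE A (Python) =====
-- def _last_confirmed_bag_before_page(existing_bag_truth, page):
--     target_page = int(page)
--     last_confirmed_bag = 0
--     for item in sorted(
--         existing_bag_truth or [],
--         key=lambda row: int(row.get("start_page", 0) or 0),
--     ):
--         start_page = int(item.get("start_page", 0) or 0)
--         bag_number = int(item.get("bag_number", 0) or 0)
--         if start_page <= 0 or bag_number <= 0:
--             continue
--         if start_page >= target_page:
--             break
--         last_confirmed_bag = bag_number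
--     return last_confirmed_bag
--
-- def _last_confirmed_bag_before_page_with_candidates(
--     existing_bag_truth,
--     provisional_bag_starts,
--     page,
-- ):
--     last_confirmed_bag = _last_confirmed_bag_before_page(existing_bag_truth, page)
--     for item in sorted(
--         provisional_bag_starts or [],
--         key=lambda row: int(row.get("page", 0) or 0),
--     ):
--         candidate_page = int(item.get("page", 0) or 0)
--         candidate_bag_number = int(item.get("bag_number", 0) or 0)
--         if candidate_page <= 0 or candidate_bag_number <= 0:
--             continue
--         if candidate_page >= int(page):
--             break
--         if candidate_bag_number > last_confirmed_bag:
--             last_confirmed_bag = candidate_bag_number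
--     return last_confirmed_bag
-- ===== SOURCE B (Python) =====
-- def _last_confirmed_bag_before_page_with_candidates(
--     existing_bag_truth,
--     provisional_bag_starts,
--     page,
-- ):
--     # One linear pass per list, no sorting needed.
--     target_page = int(page)
--     # Confirmed part: the bag of the entry with the greatest positive
--     # start_page below target_page (ties: the later entry wins, as a
--     # stable sort would order them).
--     best_start = 0
--     best_bag = 0
--     for item in (existing_bag_truth or []):
--         start_page = int(item.get("start_page", 0) or 0)
--         bag_number = int(item.get("bag_number", 0) or 0)
--         if 0 < start_page < target_page and 0 < bag_number and best_start <= start_page: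
--             best_start, best_bag = start_page, bag_number
--     # Provisional part: plain maximum over the valid candidates.
--     result = best_bag
--     for item in (provisional_bag_starts or []):
--         candidate_page = int(item.get("page", 0) or 0)
--         bag_number = int(item.get("bag_number", 0) or 0)
--         if 0 < candidate_page < target_page and 0 < bag_number:
--             result = max(result, bag_number)
--     return result
-- ===== Notes on version B (the rewrite author's own statement) =====
-- stated objective: alternative
-- what changed: B removes both sorts: one linear pass over existing_bag_truth keeps the valid entry with the greatest start_page below page (later entry wins ties, as the stable sort would order them), and one linear pass over provisional_bag_starts takes a running max of the valid candidate bag numbers, instead of A's sort-then-scan-with-break over each list.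
import Mathlib
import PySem

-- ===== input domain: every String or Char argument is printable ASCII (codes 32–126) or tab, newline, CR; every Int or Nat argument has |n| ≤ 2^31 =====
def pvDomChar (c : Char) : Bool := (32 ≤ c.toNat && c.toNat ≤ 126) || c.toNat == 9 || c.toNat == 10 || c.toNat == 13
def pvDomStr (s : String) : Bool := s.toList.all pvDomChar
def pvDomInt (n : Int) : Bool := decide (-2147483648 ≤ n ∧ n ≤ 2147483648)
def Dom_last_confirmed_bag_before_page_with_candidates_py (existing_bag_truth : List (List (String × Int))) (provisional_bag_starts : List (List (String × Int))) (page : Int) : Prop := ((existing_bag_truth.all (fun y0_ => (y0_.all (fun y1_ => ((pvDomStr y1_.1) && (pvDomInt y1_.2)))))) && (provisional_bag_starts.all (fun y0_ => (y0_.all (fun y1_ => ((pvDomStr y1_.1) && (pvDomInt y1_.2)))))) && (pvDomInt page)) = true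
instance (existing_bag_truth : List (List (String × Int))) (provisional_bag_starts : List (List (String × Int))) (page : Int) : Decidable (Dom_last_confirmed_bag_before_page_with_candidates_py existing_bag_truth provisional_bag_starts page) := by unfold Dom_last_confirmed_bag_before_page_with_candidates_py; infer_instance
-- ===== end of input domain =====

-- B replaces A's two sort-then-scan-with-break loops by one linear pass per list
-- (argmax of start_page with last-wins ties, and a running max of candidate bags).

-- int(row.get(k, 0) or 0): dict lookup with default 0; on the Int values the rows
-- hold, `int(· or 0)` is the identity (0 stays 0), so this is exactly the lookup.
def pvRowGet (row : List (String × Int)) (k : String) : Int := PySem.Dict.getD ⟨row⟩ k 0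

-- ===== PORT A =====
-- the 'for item in sorted(existing_bag_truth, key=…)' loop of _last_confirmed_bag_before_page (with its break)
def pvLoopConfirmed (page : Int) : List (List (String × Int)) → Int → Int
  | [], acc => acc
  | item :: t, acc =>
    let start_page := pvRowGet item "start_page"
    let bag_number := pvRowGet item "bag_number"
    if start_page ≤ 0 ∨ bag_number ≤ 0 then pvLoopConfirmed page t acc
    else if start_page ≥ page then acc
    else pvLoopConfirmed page t bag_number

-- _last_confirmed_bag_before_page
def pvLastConfirmedBag (existing_bag_truth : List (List (String × Int))) (page : Int) : Int :=
  pvLoopConfirmed page (PySem.List.sorted existing_bag_truth (fun row => pvRowGet row "start_page")) 0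

-- the 'for item in sorted(provisional_bag_starts, key=…)' loop (with its break)
def pvLoopCandidates (page : Int) : List (List (String × Int)) → Int → Int
  | [], acc => acc
  | item :: t, acc =>
    let candidate_page := pvRowGet item "page"
    let candidate_bag_number := pvRowGet item "bag_number"
    if candidate_page ≤ 0 ∨ candidate_bag_number ≤ 0 then pvLoopCandidates page t acc
    else if candidate_page ≥ page then acc
    else pvLoopCandidates page t (if candidate_bag_number > acc then candidate_bag_number else acc)

def last_confirmed_bag_before_page_with_candidates_py (existing_bag_truth : List (List (String × Int))) (provisional_bag_starts : List (List (String × Int))) (page : Int) : Int :=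
  pvLoopCandidates page (PySem.List.sorted provisional_bag_starts (fun row => pvRowGet row "page"))
    (pvLastConfirmedBag existing_bag_truth page)

-- ===== PORT B =====
-- one step of B's first pass: keep the valid entry with the greatest start_page (ties: later wins)
def pvBestStep (page : Int) (st : Int × Int) (item : List (String × Int)) : Int × Int :=
  let start_page := pvRowGet item "start_page"
  let bag_number := pvRowGet item "bag_number"
  if 0 < start_page ∧ start_page < page ∧ 0 < bag_number ∧ st.1 ≤ start_page then
    (start_page, bag_number)
  else st

-- one step of B's second pass: running max over the valid candidates
def pvCandStep (page : Int) (acc : Int) (item : List (String × Int)) : Int :=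
  let candidate_page := pvRowGet item "page"
  let bag_number := pvRowGet item "bag_number"
  if 0 < candidate_page ∧ candidate_page < page ∧ 0 < bag_number then max acc bag_number else acc

def last_confirmed_bag_before_page_with_candidates_py_alt (existing_bag_truth : List (List (String × Int))) (provisional_bag_starts : List (List (String × Int))) (page : Int) : Int :=
  let best := existing_bag_truth.foldl (pvBestStep page) (0, 0)
  provisional_bag_starts.foldl (pvCandStep page) best.2

-- ===== PRECONDITION & SPEC =====
def Spec_last_confirmed_bag_before_page_with_candidates_py (existing_bag_truth : List (List (String × Int))) (provisional_bag_starts : List (List (String × Int))) (page : Int) (out : Int) : Prop := out = last_confirmed_bag_before_page_with_candidates_py_alt existing_bag_truth provisional_bag_starts page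
instance (existing_bag_truth : List (List (String × Int))) (provisional_bag_starts : List (List (String × Int))) (page : Int) (out : Int) : Decidable (Spec_last_confirmed_bag_before_page_with_candidates_py existing_bag_truth provisional_bag_starts page out) := by unfold Spec_last_confirmed_bag_before_page_with_candidates_py; infer_instance

-- ===== CLAIM (what is proved, stated in full; the proofs are below) =====
def Claim_equal_last_confirmed_bag_before_page_with_candidates_py : Prop := ∀ (existing_bag_truth : List (List (String × Int))) (provisional_bag_starts : List (List (String × Int))) (page : Int), Dom_last_confirmed_bag_before_page_with_candidates_py existing_bag_truth provisional_bag_starts page → Spec_last_confirmed_bag_before_page_with_candidates_py existing_bag_truth provisional_bag_starts page (last_confirmed_bag_before_page_with_candidates_py existing_bag_truth provisional_bag_starts page)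

-- ===== LEMMAS AND PROOFS =====

-- a fold whose step never fires is the identity
theorem pv_foldl_noop {α : Type} (cond : α → Prop) [DecidablePred cond] (b : α → Int)
    (l : List α) (acc : Int) (h : ∀ x ∈ l, ¬ cond x) :
    l.foldl (fun a x => if cond x then b x else a) acc = acc := by
  induction l generalizing acc with
  | nil => rfl
  | cons y t ih =>
      simp only [List.foldl_cons]
      rw [if_neg (h y (List.mem_cons_self))]
      exact ih acc (fun x hx => h x (List.mem_cons_of_mem _ hx))

theorem pv_cons_getLastD (m : List Int) (a c : Int) :
    ((a :: m).getLast?).getD c = m.getLast?.getD a := by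
  induction m generalizing a c with
  | nil => rfl
  | cons y t ih => rw [List.getLast?_cons_cons, ih y c, ih y a]

theorem pv_append_getLastD (l m : List Int) (c : Int) (hm : m ≠ []) :
    ((l ++ m).getLast?).getD c = m.getLast?.getD c := by
  rw [List.getLast?_append]
  cases hsome : m.getLast? with
  | none => exact absurd (List.getLast?_eq_none_iff.mp hsome) hm
  | some v => rfl

-- a "last match wins" fold is the last element of the filtered list (default: the accumulator)
theorem pv_lastfold_filter {α : Type} (cond : α → Prop) [DecidablePred cond] (b : α → Int)
    (l : List α) (acc : Int) :
    l.foldl (fun a x => if cond x then b x else a) acc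
      = ((l.filter (fun x => decide (cond x))).map b).getLast?.getD acc := by
  induction l generalizing acc with
  | nil => rfl
  | cons y t ih =>
      simp only [List.foldl_cons, List.filter_cons]
      by_cases hy : cond y
      · rw [if_pos hy, if_pos (by simpa using hy), List.map_cons, pv_cons_getLastD]
        exact ih (b y)
      · rw [if_neg hy, if_neg (by simpa using hy)]
        exact ih acc

-- where insertBy puts the new element in a key-sorted list
theorem pv_insertBy_decomp {α : Type} (key : α → Int) (x : α) (s : List α)
    (hs : s.Pairwise (fun p q => key p ≤ key q)) :
    ∃ u v, PySem.List.insertBy (fun a b => decide (key a < key b)) x s = u ++ x :: v ∧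
      s = u ++ v ∧ (∀ y ∈ u, key y ≤ key x) ∧ (∀ y ∈ v, key x < key y) := by
  induction s with
  | nil => exact ⟨[], [], rfl, rfl, by simp, by simp⟩
  | cons y t ih =>
      rw [List.pairwise_cons] at hs
      by_cases hxy : key x < key y
      · refine ⟨[], y :: t, ?_, rfl, by simp, ?_⟩
        · simp [PySem.List.insertBy, hxy]
        · intro z hz
          rcases List.mem_cons.mp hz with h | h
          · subst h; exact hxy
          · exact lt_of_lt_of_le hxy (hs.1 z h)
      · obtain ⟨u, v, h1, h2, h3, h4⟩ := ih hs.2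
        refine ⟨y :: u, v, ?_, by rw [List.cons_append, h2], ?_, h4⟩
        · simp [PySem.List.insertBy, hxy, h1]
        · intro z hz
          rcases List.mem_cons.mp hz with h | h
          · subst h; omega
          · exact h3 z h

-- bounds and attainment for a conditional running max
theorem pv_condmax {α : Type} (cond : α → Prop) [DecidablePred cond] (k : α → Int)
    (l : List α) (a : Int) :
    a ≤ l.foldl (fun a x => if cond x then max a (k x) else a) a ∧
    (∀ x ∈ l, cond x → k x ≤ l.foldl (fun a x => if cond x then max a (k x) else a) a) ∧
    (l.foldl (fun a x => if cond x then max a (k x) else a) a = a ∨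
      ∃ x ∈ l, cond x ∧ k x = l.foldl (fun a x => if cond x then max a (k x) else a) a) := by
  induction l generalizing a with
  | nil => exact ⟨le_refl _, by simp, Or.inl rfl⟩
  | cons y t ih =>
      simp only [List.foldl_cons]
      by_cases hy : cond y
      · rw [if_pos hy]
        obtain ⟨ih1, ih2, ih3⟩ := ih (max a (k y))
        refine ⟨le_trans (le_max_left _ _) ih1, ?_, ?_⟩
        · intro x hx hc
          rcases List.mem_cons.mp hx with h | h
          · subst h; exact le_trans (le_max_right _ _) ih1
          · exact ih2 x h hc
        · rcases ih3 with h | ⟨z, hz, hc, hk⟩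
          · rw [h]
            by_cases hle : k y ≤ a
            · exact Or.inl (max_eq_left hle)
            · exact Or.inr ⟨y, List.mem_cons_self, hy, by omega⟩
          · exact Or.inr ⟨z, List.mem_cons_of_mem _ hz, hc, hk⟩
      · rw [if_neg hy]
        obtain ⟨ih1, ih2, ih3⟩ := ih a
        refine ⟨ih1, ?_, ?_⟩
        · intro x hx hc
          rcases List.mem_cons.mp hx with h | h
          · exact absurd (h ▸ hc) hy
          · exact ih2 x h hc
        · rcases ih3 with h | ⟨z, hz, hc, hk⟩
          · exact Or.inl h
          · exact Or.inr ⟨z, List.mem_cons_of_mem _ hz, hc, hk⟩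

-- appending one element to the sorted list = one insertBy step
theorem pv_sorted_append_singleton {α : Type} (key : α → Int) (xs : List α) (x : α) :
    PySem.List.sorted (xs ++ [x]) key
      = PySem.List.insertBy (fun a b => decide (key a < key b)) x (PySem.List.sorted xs key) := by
  rw [PySem.List.sorted_eq_foldl_insertBy, PySem.List.sorted_eq_foldl_insertBy, List.foldl_append]
  rfl

-- break elimination: on a list sorted by start_page, A's confirmed loop is a plain fold
theorem pv_breakElim_confirmed (page : Int) (l : List (List (String × Int))) (acc : Int)
    (hs : l.Pairwise (fun p q => pvRowGet p "start_page" ≤ pvRowGet q "start_page")) :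
    pvLoopConfirmed page l acc
      = l.foldl (fun a x => if 0 < pvRowGet x "start_page" ∧ pvRowGet x "start_page" < page ∧ 0 < pvRowGet x "bag_number" then pvRowGet x "bag_number" else a) acc := by
  induction l generalizing acc with
  | nil => rfl
  | cons y t ih =>
      rw [List.pairwise_cons] at hs
      simp only [pvLoopConfirmed, List.foldl_cons]
      by_cases hskip : pvRowGet y "start_page" ≤ 0 ∨ pvRowGet y "bag_number" ≤ 0
      · rw [if_pos hskip, if_neg (by omega)]
        exact ih acc hs.2
      · rw [if_neg hskip]
        by_cases hbrk : pvRowGet y "start_page" ≥ page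
        · rw [if_pos hbrk, if_neg (by omega)]
          exact (pv_foldl_noop _ _ t acc (fun x hx => by have := hs.1 x hx; omega)).symm
        · rw [if_neg hbrk, if_pos (by omega)]
          exact ih _ hs.2

-- pvCandStep is the identity once every remaining page is past the target
theorem pv_cand_noop (page : Int) (t : List (List (String × Int)))
    (h : ∀ x ∈ t, page ≤ pvRowGet x "page") (a : Int) :
    t.foldl (pvCandStep page) a = a := by
  induction t generalizing a with
  | nil => rfl
  | cons y s ih =>
      have hy : pvCandStep page a y = a := by
        unfold pvCandStep
        rw [if_neg (by have := h y List.mem_cons_self; omega)]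
      rw [List.foldl_cons, hy]
      exact ih (fun x hx => h x (List.mem_cons_of_mem _ hx)) a

-- break elimination: on a list sorted by page, A's candidate loop is B's running-max fold
theorem pv_breakElim_candidates (page : Int) (l : List (List (String × Int))) (acc : Int)
    (hs : l.Pairwise (fun p q => pvRowGet p "page" ≤ pvRowGet q "page")) :
    pvLoopCandidates page l acc = l.foldl (pvCandStep page) acc := by
  induction l generalizing acc with
  | nil => rfl
  | cons y t ih =>
      rw [List.pairwise_cons] at hs
      simp only [pvLoopCandidates, List.foldl_cons]
      by_cases hskip : pvRowGet y "page" ≤ 0 ∨ pvRowGet y "bag_number" ≤ 0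
      · have hy : pvCandStep page acc y = acc := by
          unfold pvCandStep; rw [if_neg (by omega)]
        rw [if_pos hskip, hy]
        exact ih acc hs.2
      · rw [if_neg hskip]
        by_cases hbrk : pvRowGet y "page" ≥ page
        · have hy : pvCandStep page acc y = acc := by
            unfold pvCandStep; rw [if_neg (by omega)]
          rw [if_pos hbrk, hy]
          exact (pv_cand_noop page t (fun x hx => by have := hs.1 x hx; omega) acc).symm
        · have hy : pvCandStep page acc y
              = (if pvRowGet y "bag_number" > acc then pvRowGet y "bag_number" else acc) := by
            unfold pvCandStep
            rw [if_pos (by omega)]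
            omega
          rw [if_neg hbrk, hy]
          exact ih _ hs.2

-- the main invariant of B's first pass, against the sorted list A walks
theorem pv_best_invariant (page : Int) (xs : List (List (String × Int))) :
    (((PySem.List.sorted xs (fun row => pvRowGet row "start_page")).filter
        (fun x => decide (0 < pvRowGet x "start_page" ∧ pvRowGet x "start_page" < page ∧ 0 < pvRowGet x "bag_number"))).map
        (fun x => pvRowGet x "bag_number")).getLast?.getD 0
      = (xs.foldl (pvBestStep page) (0, 0)).2 ∧
    (xs.foldl (pvBestStep page) (0, 0)).1
      = xs.foldl (fun a x => if 0 < pvRowGet x "start_page" ∧ pvRowGet x "start_page" < page ∧ 0 < pvRowGet x "bag_number" then max a (pvRowGet x "start_page") else a) 0 := by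
  induction xs using List.reverseRecOn with
  | nil => exact ⟨rfl, rfl⟩
  | append_singleton xs it ih =>
      obtain ⟨ih1, ih2⟩ := ih
      obtain ⟨u, v, hins, hsplit, hu, hv⟩ :=
        pv_insertBy_decomp (fun row => pvRowGet row "start_page") it
          (PySem.List.sorted xs (fun row => pvRowGet row "start_page"))
          (PySem.List.sorted_pairwise xs _)
      rw [pv_sorted_append_singleton, hins]
      simp only [List.foldl_append, List.foldl_cons, List.foldl_nil]
      obtain ⟨_, hbound, hattain⟩ :=
        pv_condmax (fun x => 0 < pvRowGet x "start_page" ∧ pvRowGet x "start_page" < page ∧ 0 < pvRowGet x "bag_number")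
          (fun x => pvRowGet x "start_page") xs 0
      by_cases hc : 0 < pvRowGet it "start_page" ∧ pvRowGet it "start_page" < page ∧ 0 < pvRowGet it "bag_number"
      · by_cases hle : (xs.foldl (pvBestStep page) (0, 0)).1 ≤ pvRowGet it "start_page"
        · -- the new element becomes the best
          have hstep : pvBestStep page (xs.foldl (pvBestStep page) (0, 0)) it
              = (pvRowGet it "start_page", pvRowGet it "bag_number") := by
            unfold pvBestStep
            rw [if_pos ⟨hc.1, hc.2.1, hc.2.2, hle⟩]
          have hfv : v.filter (fun x => decide (0 < pvRowGet x "start_page" ∧ pvRowGet x "start_page" < page ∧ 0 < pvRowGet x "bag_number")) = [] := by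
            rw [List.filter_eq_nil_iff]
            intro z hz
            simp only [decide_eq_true_eq]
            intro hcz
            have h1 := hv z hz
            have h2 : z ∈ xs := by
              have : z ∈ PySem.List.sorted xs (fun row => pvRowGet row "start_page") := by
                rw [hsplit]; exact List.mem_append.mpr (Or.inr hz)
              exact (PySem.List.mem_sorted _ _ _ _).mp this
            have h3 := hbound z h2 hcz
            rw [← ih2] at h3
            omega
          constructor
          · rw [List.filter_append, List.filter_cons, if_pos (by simpa using hc), hfv,
              List.map_append, List.map_cons, List.map_nil, hstep]
            exact List.getLast?_concat ▸ rfl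
          · rw [hstep, if_pos hc, ← ih2]
            omega
        · -- an earlier element with a strictly larger start_page stays the best
          have hstep : pvBestStep page (xs.foldl (pvBestStep page) (0, 0)) it
              = xs.foldl (pvBestStep page) (0, 0) := by
            unfold pvBestStep
            rw [if_neg (by tauto)]
          have hattain' : ∃ z ∈ xs, (0 < pvRowGet z "start_page" ∧ pvRowGet z "start_page" < page ∧ 0 < pvRowGet z "bag_number") ∧ pvRowGet z "start_page" = (xs.foldl (pvBestStep page) (0, 0)).1 := by
            rcases hattain with h | h
            · have h0 : (xs.foldl (pvBestStep page) (0, 0)).1 = 0 := by rw [ih2, h]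
              exact absurd h0 (by omega)
            · rw [ih2]; exact h
          obtain ⟨z, hzxs, hcz, hkz⟩ := hattain'
          have hzv : z ∈ v := by
            have hzs : z ∈ u ++ v := by
              rw [← hsplit]; exact (PySem.List.mem_sorted _ _ _ _).mpr hzxs
            rcases List.mem_append.mp hzs with h | h
            · have := hu z h; omega
            · exact h
          have hfv : v.filter (fun x => decide (0 < pvRowGet x "start_page" ∧ pvRowGet x "start_page" < page ∧ 0 < pvRowGet x "bag_number")) ≠ [] :=
            List.ne_nil_of_mem (List.mem_filter.mpr ⟨hzv, by simpa using hcz⟩)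
          have hfvm : (v.filter (fun x => decide (0 < pvRowGet x "start_page" ∧ pvRowGet x "start_page" < page ∧ 0 < pvRowGet x "bag_number"))).map (fun x => pvRowGet x "bag_number") ≠ [] := by
            simpa using hfv
          constructor
          · rw [List.filter_append, List.filter_cons, if_pos (by simpa using hc),
              List.map_append, List.map_cons, List.append_cons, hstep]
            rw [pv_append_getLastD _ _ 0 hfvm]
            rw [hsplit] at ih1
            rw [List.filter_append, List.map_append, pv_append_getLastD _ _ 0 hfvm] at ih1
            exact ih1
          · rw [hstep, if_pos hc, ← ih2]
            omega
      · -- invalid element: nothing changes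
        have hstep : pvBestStep page (xs.foldl (pvBestStep page) (0, 0)) it
            = xs.foldl (pvBestStep page) (0, 0) := by
          unfold pvBestStep
          rw [if_neg (by tauto)]
        constructor
        · rw [List.filter_append, List.filter_cons, if_neg (by simpa using hc), hstep,
            ← List.filter_append, ← hsplit]
          exact ih1
        · rw [hstep, if_neg hc]
          exact ih2

-- ===== VERDICT (by name: the statement is the Claim_ definition above) =====
theorem last_confirmed_bag_before_page_with_candidates_py_spec : Claim_equal_last_confirmed_bag_before_page_with_candidates_py := by
  intro existing_bag_truth provisional_bag_starts page _
  unfold Spec_last_confirmed_bag_before_page_with_candidates_py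
  unfold last_confirmed_bag_before_page_with_candidates_py
    last_confirmed_bag_before_page_with_candidates_py_alt
  have hbase : pvLastConfirmedBag existing_bag_truth page
      = (existing_bag_truth.foldl (pvBestStep page) (0, 0)).2 := by
    unfold pvLastConfirmedBag
    rw [pv_breakElim_confirmed page _ 0 (PySem.List.sorted_pairwise existing_bag_truth _)]
    rw [pv_lastfold_filter
      (fun x => 0 < pvRowGet x "start_page" ∧ pvRowGet x "start_page" < page ∧ 0 < pvRowGet x "bag_number")
      (fun x => pvRowGet x "bag_number")]
    exact (pv_best_invariant page existing_bag_truth).1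
  rw [hbase]
  rw [pv_breakElim_candidates page _ _ (PySem.List.sorted_pairwise provisional_bag_starts _)]
  exact @List.Perm.foldl_eq _ _ (pvCandStep page) _ _
    ⟨fun a x y => by unfold pvCandStep; dsimp only; split_ifs <;> omega⟩
    (PySem.List.sorted_perm provisional_bag_starts _ false) _
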